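-- pv_equiv track=rewrite | github.com/skobsvetlana/Skillbox | Module14/07_years/main.py | same_digits_is_three
-- ===== SOURCE A (Python) =====
-- def same_digits_is_three(number):
--     zeros = 0
--     ones = 0
--     twos = 0
--     threes = 0
--     fours = 0
--     fives = 0
--     sixes = 0
--     sevens = 0
--     eights = 0
--     nines = 0
--
--     for digit in str(number):
--         if digit == '0':
--             zeros += 1
--             if zeros == 3:
--                 return True
--         elif digit == '1':
--             ones += 1
--             if ones == 3:
--                 return True
--         elif digit == '2':
--             twos += 1
--             if twos == 3:
--                 return True
--         elif digit == '3':
--             threes += 1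
--             if threes == 3:
--                 return True
--         elif digit == '4':
--             fours += 1
--             if fours == 3:
--                 return True
--         elif digit == '5':
--             fives += 1
--             if fives == 3:
--                 return True
--         elif digit == '6':
--             sixes += 1
--             if sixes == 3:
--                 return True
--         elif digit == '7':
--             sevens += 1
--             if sevens == 3:
--                 return True
--         elif digit == '8':
--             eights += 1
--             if eights == 3:
--                 return True
--         elif digit == '9':
--             nines += 1
--             if nines == 3:
--                 return True
--
--     return False
-- ===== SOURCE B (Python) =====
-- def same_digits_is_three(number):
--     s = str(number)
--     return any(s.count(d) >= 3 for d in '0123456789')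
-- ===== Notes on version B (the rewrite author's own statement) =====
-- stated objective: idiomatic
-- what changed: Replaces the ten named counters and the early-returning if/elif chain with a single any() over the ten digits testing str(number).count(d) >= 3.
import Mathlib
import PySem

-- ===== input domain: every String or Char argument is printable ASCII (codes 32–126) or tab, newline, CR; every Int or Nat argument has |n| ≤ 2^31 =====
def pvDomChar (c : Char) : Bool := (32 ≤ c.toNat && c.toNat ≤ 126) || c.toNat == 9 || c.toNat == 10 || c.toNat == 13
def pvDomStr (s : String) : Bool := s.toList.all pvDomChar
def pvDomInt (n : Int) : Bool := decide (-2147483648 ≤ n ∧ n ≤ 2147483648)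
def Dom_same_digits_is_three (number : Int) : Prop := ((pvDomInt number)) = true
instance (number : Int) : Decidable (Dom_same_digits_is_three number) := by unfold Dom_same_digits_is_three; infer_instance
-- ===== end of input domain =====

-- B replaces A's ten named counters and early-returning if/elif chain by an any() over
-- the ten digit characters testing str(number).count(d) >= 3 (idiomatic, same cost).

-- ===== PORT A =====
-- A's loop over str(number): ten counters, early return when one reaches 3.
def sdLoopA : List Char → Int → Int → Int → Int → Int → Int → Int → Int → Int → Int → Bool
  | [], _, _, _, _, _, _, _, _, _, _ => false
  | d :: rest, zeros, ones, twos, threes, fours, fives, sixes, sevens, eights, nines =>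
    if d = '0' then
      (if zeros + 1 = 3 then true else sdLoopA rest (zeros+1) ones twos threes fours fives sixes sevens eights nines)
    else if d = '1' then
      (if ones + 1 = 3 then true else sdLoopA rest zeros (ones+1) twos threes fours fives sixes sevens eights nines)
    else if d = '2' then
      (if twos + 1 = 3 then true else sdLoopA rest zeros ones (twos+1) threes fours fives sixes sevens eights nines)
    else if d = '3' then
      (if threes + 1 = 3 then true else sdLoopA rest zeros ones twos (threes+1) fours fives sixes sevens eights nines)
    else if d = '4' then
      (if fours + 1 = 3 then true else sdLoopA rest zeros ones twos threes (fours+1) fives sixes sevens eights nines)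
    else if d = '5' then
      (if fives + 1 = 3 then true else sdLoopA rest zeros ones twos threes fours (fives+1) sixes sevens eights nines)
    else if d = '6' then
      (if sixes + 1 = 3 then true else sdLoopA rest zeros ones twos threes fours fives (sixes+1) sevens eights nines)
    else if d = '7' then
      (if sevens + 1 = 3 then true else sdLoopA rest zeros ones twos threes fours fives sixes (sevens+1) eights nines)
    else if d = '8' then
      (if eights + 1 = 3 then true else sdLoopA rest zeros ones twos threes fours fives sixes sevens (eights+1) nines)
    else if d = '9' then
      (if nines + 1 = 3 then true else sdLoopA rest zeros ones twos threes fours fives sixes sevens eights (nines+1))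
    else
      sdLoopA rest zeros ones twos threes fours fives sixes sevens eights nines

def same_digits_is_three (number : Int) : Bool :=
  sdLoopA (PySem.Int.toChars number) 0 0 0 0 0 0 0 0 0 0

-- ===== PORT B =====
def same_digits_is_three_alt (number : Int) : Bool :=
  let s := PySem.Int.toChars number
  ['0','1','2','3','4','5','6','7','8','9'].any (fun d => 3 ≤ PySem.Chars.count s [d])

-- ===== PRECONDITION & SPEC =====
def Spec_same_digits_is_three (number : Int) (out : Bool) : Prop := out = same_digits_is_three_alt number
instance (number : Int) (out : Bool) : Decidable (Spec_same_digits_is_three number out) := by unfold Spec_same_digits_is_three; infer_instance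

-- ===== CLAIM (what is proved, stated in full; the proofs are below) =====
def Claim_equal_same_digits_is_three : Prop := ∀ (number : Int), Dom_same_digits_is_three number → Spec_same_digits_is_three number (same_digits_is_three number)

-- ===== LEMMAS AND PROOFS =====

-- Python's s.count(c) for a single character c is the plain character count.
theorem count_go_single (c : Char) :
    ∀ (l : List Char) (fuel acc : Nat), l.length ≤ fuel →
      PySem.Chars.count.go [c] fuel l acc = acc + l.count c := by
  intro l
  induction l with
  | nil => intro fuel acc _; cases fuel <;> simp [PySem.Chars.count.go]
  | cons h t ih =>
    intro fuel acc hf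
    cases fuel with
    | zero => simp at hf
    | succ f =>
      simp only [PySem.Chars.count.go]
      by_cases hc : h = c
      · subst hc
        simp only [List.isPrefixOf, beq_self_eq_true, Bool.true_and,
          if_pos, List.length_singleton, List.drop_one, List.tail_cons]
        rw [ih f (acc + 1) (by simpa using hf)]
        simp
        omega
      · have : ¬ ([c].isPrefixOf (h :: t) = true) := by
          simp [List.isPrefixOf]
          exact fun hh => absurd hh.symm hc
        rw [if_neg this, ih f acc (by simpa using hf)]
        simp [hc]

theorem count_single (s : List Char) (c : Char) :
    PySem.Chars.count s [c] = s.count c := by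
  simp only [PySem.Chars.count, List.isEmpty_cons, Bool.false_eq_true, if_false]
  simpa using count_go_single c s s.length 0 le_rfl

-- Characterisation of A's loop: with all ten counters ≤ 2 it returns true exactly
-- when some digit's counter plus its remaining occurrences reaches 3.
set_option maxHeartbeats 2000000 in
theorem sdLoopA_spec :
    ∀ (s : List Char) (c0 c1 c2 c3 c4 c5 c6 c7 c8 c9 : Int),
      c0 ≤ 2 → c1 ≤ 2 → c2 ≤ 2 → c3 ≤ 2 → c4 ≤ 2 → c5 ≤ 2 → c6 ≤ 2 → c7 ≤ 2 → c8 ≤ 2 → c9 ≤ 2 →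
      (sdLoopA s c0 c1 c2 c3 c4 c5 c6 c7 c8 c9 = true ↔
        (3 ≤ c0 + s.count '0' ∨ 3 ≤ c1 + s.count '1' ∨ 3 ≤ c2 + s.count '2' ∨
         3 ≤ c3 + s.count '3' ∨ 3 ≤ c4 + s.count '4' ∨ 3 ≤ c5 + s.count '5' ∨
         3 ≤ c6 + s.count '6' ∨ 3 ≤ c7 + s.count '7' ∨ 3 ≤ c8 + s.count '8' ∨
         3 ≤ c9 + s.count '9')) := by
  intro s
  induction s with
  | nil =>
    intro c0 c1 c2 c3 c4 c5 c6 c7 c8 c9 h0 h1 h2 h3 h4 h5 h6 h7 h8 h9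
    simp [sdLoopA]
    omega
  | cons d rest ih =>
    intro c0 c1 c2 c3 c4 c5 c6 c7 c8 c9 h0 h1 h2 h3 h4 h5 h6 h7 h8 h9
    simp only [sdLoopA]
    split_ifs
    all_goals (try rw [ih _ _ _ _ _ _ _ _ _ _ (by omega) (by omega) (by omega) (by omega) (by omega) (by omega) (by omega) (by omega) (by omega) (by omega)])
    all_goals clear ih
    all_goals simp only [List.count_cons, beq_iff_eq, true_iff]
    all_goals (try subst d)
    all_goals (try rw [if_neg (show ¬ d = '0' by assumption), if_neg (show ¬ d = '1' by assumption),
      if_neg (show ¬ d = '2' by assumption), if_neg (show ¬ d = '3' by assumption),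
      if_neg (show ¬ d = '4' by assumption), if_neg (show ¬ d = '5' by assumption),
      if_neg (show ¬ d = '6' by assumption), if_neg (show ¬ d = '7' by assumption),
      if_neg (show ¬ d = '8' by assumption), if_neg (show ¬ d = '9' by assumption)])
    all_goals push_cast
    all_goals (repeat' apply or_congr)
    all_goals omega

-- ===== VERDICT (by name: the statement is the Claim_ definition above) =====
theorem same_digits_is_three_spec : Claim_equal_same_digits_is_three := by
  intro number _
  unfold Spec_same_digits_is_three
  rw [Bool.eq_iff_iff]
  unfold same_digits_is_three same_digits_is_three_alt
  rw [sdLoopA_spec (PySem.Int.toChars number) 0 0 0 0 0 0 0 0 0 0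
    (by norm_num) (by norm_num) (by norm_num) (by norm_num) (by norm_num)
    (by norm_num) (by norm_num) (by norm_num) (by norm_num) (by norm_num)]
  simp only [List.any_cons, List.any_nil, Bool.or_eq_true, Bool.or_false,
    decide_eq_true_eq, count_single]
  omega
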